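-- pv_equiv track=rewrite | github.com/bendpannell/Advent-of-Code | 2022/Day 5/day5.py | find_last_value
-- ===== SOURCE A (Python) =====
-- def find_last_value(df, start_col):
--     last_value_index = -1
--
--     for i, v in enumerate(df[start_col]):
--
--         if v != 'xx':
--             last_value_index = i
--         else:
--             break
--
--     return last_value_index
-- ===== SOURCE B (Python) =====
-- def find_last_value(df, start_col):
--     col = list(df[start_col])
--     if 'xx' in col:
--         return col.index('xx') - 1
--     return len(col) - 1
-- ===== Notes on version B (the rewrite author's own statement) =====
-- stated objective: simpler
-- what changed: Instead of scanning with a running last-seen index, B locates the first 'xx' sentinel with list membership/.index and subtracts one (or uses len-1 if absent).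
import Mathlib
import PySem

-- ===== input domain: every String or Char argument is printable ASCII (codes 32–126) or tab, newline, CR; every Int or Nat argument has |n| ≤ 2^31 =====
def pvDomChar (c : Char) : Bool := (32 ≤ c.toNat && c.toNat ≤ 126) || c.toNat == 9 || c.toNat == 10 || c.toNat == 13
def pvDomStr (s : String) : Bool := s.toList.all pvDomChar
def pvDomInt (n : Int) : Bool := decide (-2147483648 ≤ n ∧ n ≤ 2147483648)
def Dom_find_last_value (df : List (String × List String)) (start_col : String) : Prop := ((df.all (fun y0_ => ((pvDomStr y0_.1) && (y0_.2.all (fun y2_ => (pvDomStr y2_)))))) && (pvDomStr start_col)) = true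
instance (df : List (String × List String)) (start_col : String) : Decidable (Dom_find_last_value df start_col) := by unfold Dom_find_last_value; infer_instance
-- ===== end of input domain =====

-- B replaces A's running last-non-'xx' index with a direct search for the first 'xx' sentinel (index-1, or len-1 if absent): simpler decomposition, same cost.


-- ===== PORT A =====
-- df[start_col] on the association list: first matching key (exact Python dict lookup; raises KeyError = none)
def pvLookup (df : List (String × List String)) (k : String) : Option (List String) :=
  (df.find? (fun p => p.1 == k)).map (·.2)

-- the for-loop over enumerate(df[start_col]) with running last_value_index, break on 'xx'
def findLastLoop : List String → Int → Int → Int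
  | [], _, last => last
  | v :: rest, i, last => if v ≠ "xx" then findLastLoop rest (i + 1) i else last

def find_last_value (df : List (String × List String)) (start_col : String) : Int :=
  findLastLoop ((pvLookup df start_col).getD []) 0 (-1)

-- ===== PORT B =====
def find_last_value_alt (df : List (String × List String)) (start_col : String) : Int :=
  let col := (pvLookup df start_col).getD []
  match PySem.List.index? col "xx" with
  | some n => (n : Int) - 1
  | none => (col.length : Int) - 1

-- ===== PRECONDITION & SPEC =====
-- A raises KeyError when start_col is not a key of df; Pre_ requires the key to be present.
def Pre_find_last_value (df : List (String × List String)) (start_col : String) : Prop :=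
  (pvLookup df start_col).isSome = true
instance (df : List (String × List String)) (start_col : String) : Decidable (Pre_find_last_value df start_col) := by unfold Pre_find_last_value; infer_instance
def pvWitness_find_last_value : (List (String × List String)) × String :=
  ([("c", ["a", "xx", "b"])], "c")

def Spec_find_last_value (df : List (String × List String)) (start_col : String) (out : Int) : Prop := out = find_last_value_alt df start_col
instance (df : List (String × List String)) (start_col : String) (out : Int) : Decidable (Spec_find_last_value df start_col out) := by unfold Spec_find_last_value; infer_instance

-- ===== CLAIM (what is proved, stated in full; the proofs are below) =====
def Claim_equal_find_last_value : Prop := ∀ (df : List (String × List String)) (start_col : String), Dom_find_last_value df start_col → Pre_find_last_value df start_col → Spec_find_last_value df start_col (find_last_value df start_col)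

-- ===== LEMMAS AND PROOFS =====
lemma findLastLoop_eq (col : List String) (i : Int) :
    findLastLoop col i (i - 1) =
      match PySem.List.index? col "xx" with
      | some n => i + n - 1
      | none => i + col.length - 1 := by
  induction col generalizing i with
  | nil => simp [findLastLoop, PySem.List.index?]
  | cons v rest ih =>
    by_cases hv : v = "xx"
    · subst hv
      rw [PySem.List.index?_cons_self]
      simp [findLastLoop]
    · rw [PySem.List.index?_cons_of_ne rest hv]
      have : findLastLoop (v :: rest) i (i - 1) = findLastLoop rest (i + 1) ((i + 1) - 1) := by
        simp [findLastLoop, hv]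
      rw [this, ih]
      cases PySem.List.index? rest "xx" with
      | none => simp; omega
      | some n => simp [Option.map]; omega

-- ===== VERDICT (by name: the statement is the Claim_ definition above) =====
theorem find_last_value_spec : Claim_equal_find_last_value := by
  intro df start_col _ _
  unfold Spec_find_last_value find_last_value find_last_value_alt
  have h := findLastLoop_eq ((pvLookup df start_col).getD []) 0
  norm_num at h
  rw [h]
  cases PySem.List.index? ((pvLookup df start_col).getD []) "xx" with
  | none => simp
  | some n => simp
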